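-- pv_equiv track=rewrite | github.com/pranikamassey/LLMLinkedInProject | app/normalize.py | is_valid_profile_url
-- ===== SOURCE A (Python) =====
-- LINKEDIN_PROFILE_PREFIXES = (
--     "https://www.linkedin.com/in/",
--     "http://www.linkedin.com/in/",
--     "https://linkedin.com/in/",
--     "http://linkedin.com/in/",
-- )
--
-- REJECT_SUBPATHS = (
--     "/company/",
--     "/jobs/",
--     "/posts/",
--     "/feed/",
--     "/groups/",
--     "/learning/",
--     "/pub/",
-- )
--
-- def is_valid_profile_url(url: str) -> bool:
--     u = url.strip()
--     if not u.startswith(LINKEDIN_PROFILE_PREFIXES):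
--         return False
--     for bad in REJECT_SUBPATHS:
--         if bad in u:
--             return False
--     return True
-- ===== SOURCE B (Python) =====
-- BAD_SUBPATHS = (
--     "/company/",
--     "/jobs/",
--     "/posts/",
--     "/feed/",
--     "/groups/",
--     "/learning/",
--     "/pub/",
-- )
--
-- def is_valid_profile_url(url: str) -> bool:
--     u = url.strip()
--     for scheme in ("https://", "http://"):
--         if u.startswith(scheme):
--             rest = u[len(scheme):]
--             break
--     else:
--         return False
--     if rest.startswith("www."):
--         rest = rest[4:]
--     if not rest.startswith("linkedin.com/in/"):
--         return False
--     return not any(bad in u for bad in BAD_SUBPATHS)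
-- ===== Notes on version B (the rewrite author's own statement) =====
-- stated objective: alternative
-- what changed: B parses the URL structurally (scheme, then optional 'www.', then the 'linkedin.com/in/' host-path) instead of testing a tuple of four literal prefixes, and rejects with a single any() over the bad subpaths.
import Mathlib
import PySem

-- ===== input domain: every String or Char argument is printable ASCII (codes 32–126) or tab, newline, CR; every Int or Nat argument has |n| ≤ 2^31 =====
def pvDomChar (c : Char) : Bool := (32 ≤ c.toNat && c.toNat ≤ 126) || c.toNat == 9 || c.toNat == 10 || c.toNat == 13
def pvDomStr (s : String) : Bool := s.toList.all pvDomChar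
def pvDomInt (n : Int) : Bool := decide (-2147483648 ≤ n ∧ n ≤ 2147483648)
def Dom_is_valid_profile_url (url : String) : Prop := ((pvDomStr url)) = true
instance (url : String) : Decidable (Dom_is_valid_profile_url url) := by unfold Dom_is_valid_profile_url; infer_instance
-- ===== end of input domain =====

-- B parses the URL structurally (scheme, optional "www.", host-path) instead of testing a
-- tuple of four literal prefixes (objective: alternative).

-- ===== PORT A =====
def pvLinkedinProfilePrefixes : List String :=
  ["https://www.linkedin.com/in/", "http://www.linkedin.com/in/",
   "https://linkedin.com/in/", "http://linkedin.com/in/"]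

def pvRejectSubpaths : List String :=
  ["/company/", "/jobs/", "/posts/", "/feed/", "/groups/", "/learning/", "/pub/"]

def is_valid_profile_url (url : String) : Bool :=
  let u := PySem.Str.strip url
  if !(pvLinkedinProfilePrefixes.any (fun p => PySem.Str.startswith u p)) then false
  else if pvRejectSubpaths.any (fun bad => PySem.Str.isIn bad u) then false
  else true

-- ===== PORT B =====
def pvBadSubpaths : List String :=
  ["/company/", "/jobs/", "/posts/", "/feed/", "/groups/", "/learning/", "/pub/"]

def is_valid_profile_url_alt (url : String) : Bool :=
  let u := PySem.Str.strip url
  -- for scheme in ("https://", "http://"): if u.startswith(scheme): rest = u[len(scheme):]; break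
  let rest0 : Option String :=
    if PySem.Str.startswith u "https://" then some (PySem.Str.slice u (some 8) none)
    else if PySem.Str.startswith u "http://" then some (PySem.Str.slice u (some 7) none)
    else none
  match rest0 with
  | none => false
  | some r =>
    let rest := if PySem.Str.startswith r "www." then PySem.Str.slice r (some 4) none else r
    if !PySem.Str.startswith rest "linkedin.com/in/" then false
    else !(pvBadSubpaths.any (fun bad => PySem.Str.isIn bad u))

-- ===== PRECONDITION & SPEC =====
def Spec_is_valid_profile_url (url : String) (out : Bool) : Prop := out = is_valid_profile_url_alt url
instance (url : String) (out : Bool) : Decidable (Spec_is_valid_profile_url url out) := by unfold Spec_is_valid_profile_url; infer_instance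

-- ===== CLAIM (what is proved, stated in full; the proofs are below) =====
def Claim_equal_is_valid_profile_url : Prop := ∀ (url : String), Dom_is_valid_profile_url url → Spec_is_valid_profile_url url (is_valid_profile_url url)

-- ===== LEMMAS AND PROOFS =====

-- prefix through an append, with the remainder of the string
theorem pv_prefix_append_iff (p q s : List Char) :
    p ++ q <+: s ↔ p <+: s ∧ q <+: s.drop p.length := by
  constructor
  · intro h
    refine ⟨(List.prefix_append p q).trans h, ?_⟩
    obtain ⟨t, rfl⟩ := h
    simp [List.drop_left']
  · rintro ⟨⟨t, rfl⟩, hq⟩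
    simp only [List.drop_left'] at hq
    obtain ⟨r, rfl⟩ := hq
    exact ⟨r, by simp⟩

theorem pv_sw_append (s p q : List Char) :
    PySem.Chars.startswith s (p ++ q)
      = (PySem.Chars.startswith s p && PySem.Chars.startswith (s.drop p.length) q) := by
  rw [Bool.eq_iff_iff]
  simp [PySem.Chars.startswith_iff, pv_prefix_append_iff]

-- two prefixes of the same string: if neither is a prefix of the other, they exclude each other
theorem pv_sw_excl (s p q : List Char) (hpq : ¬ p <+: q) (hqp : ¬ q <+: p)
    (hp : PySem.Chars.startswith s p = true) : PySem.Chars.startswith s q = false := by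
  rw [PySem.Chars.startswith_iff] at hp
  rw [← Bool.not_eq_true, PySem.Chars.startswith_iff]
  intro hq
  rcases List.prefix_or_prefix_of_prefix hp hq with h | h
  · exact hpq h
  · exact hqp h

theorem pv_pref_chars (s : List Char) :
    (PySem.Chars.startswith s "https://www.linkedin.com/in/".toList ||
     (PySem.Chars.startswith s "http://www.linkedin.com/in/".toList ||
      (PySem.Chars.startswith s "https://linkedin.com/in/".toList ||
       PySem.Chars.startswith s "http://linkedin.com/in/".toList)))
    = (if PySem.Chars.startswith s "https://".toList then
         (if PySem.Chars.startswith (s.drop 8) "www.".toList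
          then PySem.Chars.startswith ((s.drop 8).drop 4) "linkedin.com/in/".toList
          else PySem.Chars.startswith (s.drop 8) "linkedin.com/in/".toList)
       else if PySem.Chars.startswith s "http://".toList then
         (if PySem.Chars.startswith (s.drop 7) "www.".toList
          then PySem.Chars.startswith ((s.drop 7).drop 4) "linkedin.com/in/".toList
          else PySem.Chars.startswith (s.drop 7) "linkedin.com/in/".toList)
       else false) := by
  have dec1 : "https://www.linkedin.com/in/".toList
      = "https://".toList ++ ("www.".toList ++ "linkedin.com/in/".toList) := by decide
  have dec2 : "http://www.linkedin.com/in/".toList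
      = "http://".toList ++ ("www.".toList ++ "linkedin.com/in/".toList) := by decide
  have dec3 : "https://linkedin.com/in/".toList
      = "https://".toList ++ "linkedin.com/in/".toList := by decide
  have dec4 : "http://linkedin.com/in/".toList
      = "http://".toList ++ "linkedin.com/in/".toList := by decide
  have l8 : ("https://".toList).length = 8 := by decide
  have l7 : ("http://".toList).length = 7 := by decide
  have l4 : ("www.".toList).length = 4 := by decide
  rw [dec1, dec2, dec3, dec4]
  simp only [pv_sw_append, l8, l7, l4]
  by_cases h8 : PySem.Chars.startswith s "https://".toList = true
  · have h7f : PySem.Chars.startswith s "http://".toList = false :=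
      pv_sw_excl s _ _ (by decide) (by decide) h8
    by_cases hw : PySem.Chars.startswith (s.drop 8) "www.".toList = true
    · have hlf : PySem.Chars.startswith (s.drop 8) "linkedin.com/in/".toList = false :=
        pv_sw_excl _ _ _ (by decide) (by decide) hw
      simp_all
    · rw [Bool.not_eq_true] at hw
      simp_all
  · rw [Bool.not_eq_true] at h8
    by_cases h7 : PySem.Chars.startswith s "http://".toList = true
    · by_cases hw : PySem.Chars.startswith (s.drop 7) "www.".toList = true
      · have hlf : PySem.Chars.startswith (s.drop 7) "linkedin.com/in/".toList = false :=
          pv_sw_excl _ _ _ (by decide) (by decide) hw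
        simp_all
      · rw [Bool.not_eq_true] at hw
        simp_all
    · rw [Bool.not_eq_true] at h7
      simp_all

theorem is_valid_profile_url_eq (url : String) :
    is_valid_profile_url url = is_valid_profile_url_alt url := by
  unfold is_valid_profile_url is_valid_profile_url_alt
  dsimp only
  generalize PySem.Str.strip url = u
  have hBR : pvBadSubpaths = pvRejectSubpaths := rfl
  rw [hBR]
  have e8 : PySem.List.slice u.toList (some (8:Int)) none = u.toList.drop 8 := by
    have h := PySem.List.slice_from_natCast u.toList 8; norm_num at h; exact h
  have e7 : PySem.List.slice u.toList (some (7:Int)) none = u.toList.drop 7 := by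
    have h := PySem.List.slice_from_natCast u.toList 7; norm_num at h; exact h
  have e4 : ∀ l : List Char, PySem.List.slice l (some (4:Int)) none = l.drop 4 := by
    intro l; have h := PySem.List.slice_from_natCast l 4; norm_num at h; exact h
  have hP : (pvLinkedinProfilePrefixes.any (fun p => PySem.Str.startswith u p))
      = (PySem.Chars.startswith u.toList "https://www.linkedin.com/in/".toList ||
         (PySem.Chars.startswith u.toList "http://www.linkedin.com/in/".toList ||
          (PySem.Chars.startswith u.toList "https://linkedin.com/in/".toList ||
           PySem.Chars.startswith u.toList "http://linkedin.com/in/".toList))) := by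
    simp only [pvLinkedinProfilePrefixes, List.any_cons, List.any_nil, Bool.or_false,
      PySem.Str.startswith_eq]
  rw [hP, pv_pref_chars u.toList]
  set R := pvRejectSubpaths.any (fun bad => PySem.Str.isIn bad u) with hR
  by_cases H8 : PySem.Str.startswith u "https://" = true
  · have H8' : PySem.Chars.startswith u.toList "https://".toList = true := by
      rw [← PySem.Str.startswith_eq]; exact H8
    rw [if_pos H8, if_pos H8']
    dsimp only
    by_cases HW : PySem.Str.startswith (PySem.Str.slice u (some 8) none) "www." = true
    · have HW' : PySem.Chars.startswith (u.toList.drop 8) "www.".toList = true := by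
        rw [← e8, ← PySem.Chars.slice_eq_listSlice, ← PySem.Str.toList_slice,
          ← PySem.Str.startswith_eq]
        exact HW
      rw [if_pos HW, if_pos HW']
      have hL : PySem.Str.startswith
          (PySem.Str.slice (PySem.Str.slice u (some 8) none) (some 4) none) "linkedin.com/in/"
          = PySem.Chars.startswith ((u.toList.drop 8).drop 4) "linkedin.com/in/".toList := by
        rw [PySem.Str.startswith_eq, PySem.Str.toList_slice, PySem.Chars.slice_eq_listSlice,
          PySem.Str.toList_slice, PySem.Chars.slice_eq_listSlice, e8, e4]
      rw [← hL]
      cases h : PySem.Str.startswith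
          (PySem.Str.slice (PySem.Str.slice u (some 8) none) (some 4) none) "linkedin.com/in/" <;>
        cases hr : R <;> simp
    · have HW' : PySem.Chars.startswith (u.toList.drop 8) "www.".toList = false := by
        rw [← e8, ← PySem.Chars.slice_eq_listSlice, ← PySem.Str.toList_slice,
          ← PySem.Str.startswith_eq, ← Bool.not_eq_true]
        exact HW
      rw [if_neg HW,
        if_neg (show ¬ PySem.Chars.startswith (u.toList.drop 8) "www.".toList = true by
          rw [HW']; simp)]
      have hL : PySem.Str.startswith (PySem.Str.slice u (some 8) none) "linkedin.com/in/"
          = PySem.Chars.startswith (u.toList.drop 8) "linkedin.com/in/".toList := by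
        rw [PySem.Str.startswith_eq, PySem.Str.toList_slice, PySem.Chars.slice_eq_listSlice, e8]
      rw [← hL]
      cases h : PySem.Str.startswith (PySem.Str.slice u (some 8) none) "linkedin.com/in/" <;>
        cases hr : R <;> simp
  · have H8' : PySem.Chars.startswith u.toList "https://".toList = false := by
      rw [← PySem.Str.startswith_eq, ← Bool.not_eq_true]; exact H8
    rw [if_neg H8,
      if_neg (show ¬ PySem.Chars.startswith u.toList "https://".toList = true by
        rw [H8']; simp)]
    by_cases H7 : PySem.Str.startswith u "http://" = true
    · have H7' : PySem.Chars.startswith u.toList "http://".toList = true := by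
        rw [← PySem.Str.startswith_eq]; exact H7
      rw [if_pos H7, if_pos H7']
      dsimp only
      by_cases HW : PySem.Str.startswith (PySem.Str.slice u (some 7) none) "www." = true
      · have HW' : PySem.Chars.startswith (u.toList.drop 7) "www.".toList = true := by
          rw [← e7, ← PySem.Chars.slice_eq_listSlice, ← PySem.Str.toList_slice,
            ← PySem.Str.startswith_eq]
          exact HW
        rw [if_pos HW, if_pos HW']
        have hL : PySem.Str.startswith
            (PySem.Str.slice (PySem.Str.slice u (some 7) none) (some 4) none) "linkedin.com/in/"
            = PySem.Chars.startswith ((u.toList.drop 7).drop 4) "linkedin.com/in/".toList := by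
          rw [PySem.Str.startswith_eq, PySem.Str.toList_slice, PySem.Chars.slice_eq_listSlice,
            PySem.Str.toList_slice, PySem.Chars.slice_eq_listSlice, e7, e4]
        rw [← hL]
        cases h : PySem.Str.startswith
            (PySem.Str.slice (PySem.Str.slice u (some 7) none) (some 4) none) "linkedin.com/in/" <;>
          cases hr : R <;> simp
      · have HW' : PySem.Chars.startswith (u.toList.drop 7) "www.".toList = false := by
          rw [← e7, ← PySem.Chars.slice_eq_listSlice, ← PySem.Str.toList_slice,
            ← PySem.Str.startswith_eq, ← Bool.not_eq_true]
          exact HW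
        rw [if_neg HW,
          if_neg (show ¬ PySem.Chars.startswith (u.toList.drop 7) "www.".toList = true by
            rw [HW']; simp)]
        have hL : PySem.Str.startswith (PySem.Str.slice u (some 7) none) "linkedin.com/in/"
            = PySem.Chars.startswith (u.toList.drop 7) "linkedin.com/in/".toList := by
          rw [PySem.Str.startswith_eq, PySem.Str.toList_slice, PySem.Chars.slice_eq_listSlice, e7]
        rw [← hL]
        cases h : PySem.Str.startswith (PySem.Str.slice u (some 7) none) "linkedin.com/in/" <;>
          cases hr : R <;> simp
    · have H7' : PySem.Chars.startswith u.toList "http://".toList = false := by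
        rw [← PySem.Str.startswith_eq, ← Bool.not_eq_true]; exact H7
      rw [if_neg H7,
        if_neg (show ¬ PySem.Chars.startswith u.toList "http://".toList = true by
          rw [H7']; simp)]
      simp

-- ===== VERDICT (by name: the statement is the Claim_ definition above) =====
theorem is_valid_profile_url_spec : Claim_equal_is_valid_profile_url := by
  intro url _
  unfold Spec_is_valid_profile_url
  exact is_valid_profile_url_eq url
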